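-- pv_equiv track=rewrite | github.com/ChessPark0613/algorithm-repo | Other/Gosper's Hack/Gosper's Hack.py | gosper_masks
-- ===== SOURCE A (Python) =====
-- def gosper_masks(n: int, k: int):
--     if not (0 <= k <= n):
--         return
--     if k == 0:
--         yield 0; return
--     s = (1 << k) - 1
--     limit = 1 << n
--     while s < limit:
--         yield s
--         c = s & -s
--         r = s + c
--         s = (((r ^ s) >> 2) // c) | r
-- ===== SOURCE B (Python) =====
-- def gosper_masks(n, k):
--     if not (0 <= k <= n):
--         return
--     if k == 0:
--         yield 0
--         return
--     for h in range(k - 1, n):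
--         for m in gosper_masks(h, k - 1):
--             yield m | (1 << h)
-- ===== Notes on version B (the rewrite author's own statement) =====
-- stated objective: simpler
-- what changed: Replaces Gosper's bit-trick successor loop (c = s & -s; r = s + c; s = (((r ^ s) >> 2) // c) | r) with a three-line recursion on the highest set bit: for each highest bit position h from k-1 to n-1, yield every (k-1)-bit mask below 2^h with bit h added; this emits the same ascending sequence.
import Mathlib
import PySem

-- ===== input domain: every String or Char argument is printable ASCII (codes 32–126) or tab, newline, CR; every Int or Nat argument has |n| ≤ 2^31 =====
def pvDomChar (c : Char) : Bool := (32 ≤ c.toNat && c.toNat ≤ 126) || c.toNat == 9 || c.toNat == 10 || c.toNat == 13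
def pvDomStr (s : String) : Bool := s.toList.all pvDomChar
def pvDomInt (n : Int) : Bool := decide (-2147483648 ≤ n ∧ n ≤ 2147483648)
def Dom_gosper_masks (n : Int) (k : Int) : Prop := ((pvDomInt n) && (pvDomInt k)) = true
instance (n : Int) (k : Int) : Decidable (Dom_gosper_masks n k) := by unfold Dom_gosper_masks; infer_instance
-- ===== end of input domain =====

-- B replaces Gosper's bit-trick successor loop by a short recursion on the highest set bit
-- (each mask is a smaller mask below its highest one-bit); objective: simpler.
-- Both functions are generators; the equivalence is about the list of yielded values.

-- ===== PORT A =====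
-- Gosper's-hack successor: c = s & -s; r = s + c; (((r ^ s) >> 2) // c) | r
def gosperNext (s : Int) : Int :=
  let c := PySem.Int.band s (-s)
  let r := s + c
  PySem.Int.bor (PySem.Int.floordiv (PySem.Int.bxor r s >>> (2:Nat)) c) r

-- the while loop; fuel is a pure totality device (2^n bounds the iteration count,
-- since the successor strictly increases below the limit)
def gosperLoop : Nat → Int → Int → List Int
  | 0, _, _ => []
  | fuel+1, s, limit =>
    if s < limit then s :: gosperLoop fuel (gosperNext s) limit else []

def gosper_masks (n : Int) (k : Int) : List Int :=
  if ¬ (0 ≤ k ∧ k ≤ n) then []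
  else if k = 0 then [0]
  else
    let s := (1 : Int) <<< k.toNat - 1
    let limit := (1 : Int) <<< n.toNat
    gosperLoop limit.toNat s limit

-- ===== PORT B =====
-- Source B:  for h in range(k-1, n): for m in gosper_masks(h, k-1): yield m | (1 << h)
def gosper_masks_alt (n : Int) (k : Int) : List Int :=
  if ¬ (0 ≤ k ∧ k ≤ n) then []
  else if k = 0 then [0]
  else (PySem.List.pyRange (k - 1) n 1).flatMap
        (fun h => (gosper_masks_alt h (k - 1)).map
          (fun m => PySem.Int.bor m ((1 : Int) <<< h.toNat)))
termination_by k.toNat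
decreasing_by
  rename_i h1 h2
  rw [not_not] at h1
  omega

-- ===== PRECONDITION & SPEC =====
def Spec_gosper_masks (n : Int) (k : Int) (out : List Int) : Prop := out = gosper_masks_alt n k
instance (n : Int) (k : Int) (out : List Int) : Decidable (Spec_gosper_masks n k out) := by unfold Spec_gosper_masks; infer_instance

-- ===== CLAIM (what is proved, stated in full; the proofs are below) =====
def Claim_equal_gosper_masks : Prop := ∀ (n : Int) (k : Int), Dom_gosper_masks n k → Spec_gosper_masks n k (gosper_masks n k)

-- ===== LEMMAS AND PROOFS =====

-- popcount on Nat, the common specification language of both ports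
def popc : Nat → Nat
  | 0 => 0
  | x+1 => (x+1) % 2 + popc ((x+1)/2)
decreasing_by omega

lemma popc_eq (x : Nat) : popc x = x % 2 + popc (x / 2) := by
  cases x <;> simp [popc]

lemma popc_two_mul_add (a b : Nat) (hb : b < 2) : popc (2*a + b) = popc a + b := by
  rw [popc_eq]
  have h1 : (2*a + b) % 2 = b := by omega
  have h2 : (2*a + b) / 2 = a := by omega
  rw [h1, h2]; omega

lemma popc_eq_zero (x : Nat) : popc x = 0 ↔ x = 0 := by
  induction x using Nat.strong_induction_on with
  | _ x ih =>
    cases x with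
    | zero => simp [popc]
    | succ y =>
      rw [popc_eq]
      constructor
      · intro h
        have h2 := (ih ((y+1)/2) (by omega)).mp (by omega)
        omega
      · omega

lemma popc_mulAdd (e : Nat) : ∀ a b : Nat, b < 2^e → popc (a * 2^e + b) = popc a + popc b := by
  induction e with
  | zero => intro a b hb; interval_cases b; simp [popc]
  | succ e ih =>
    intro a b hb
    have hb2 : b / 2 < 2^e := by
      have : 2^(e+1) = 2*2^e := by ring
      omega
    have key : a * 2^(e+1) + b = 2*(a * 2^e + b/2) + b % 2 := by
      have h3 : a * 2^(e+1) = 2*(a * 2^e) := by ring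
      omega
    rw [key, popc_two_mul_add _ _ (by omega), ih a (b/2) hb2]
    have : popc b = popc (b/2) + b % 2 := by
      conv_lhs => rw [show b = 2*(b/2) + b % 2 by omega]
      rw [popc_two_mul_add _ _ (by omega)]
    omega

lemma popc_two_pow_sub_one (m : Nat) : popc (2^m - 1) = m := by
  induction m with
  | zero => simp [popc]
  | succ m ih =>
    have key : 2^(m+1) - 1 = 2*(2^m - 1) + 1 := by
      have : 2^(m+1) = 2*2^m := by ring
      have : 1 ≤ 2^m := Nat.one_le_two_pow
      omega
    rw [key, popc_two_mul_add _ _ (by omega), ih]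

lemma popc_bound (m : Nat) : ∀ b : Nat, b < 2^m → popc b ≤ m ∧ (popc b = m → b = 2^m - 1) := by
  induction m with
  | zero => intro b hb; interval_cases b; simp [popc]
  | succ m ih =>
    intro b hb
    have h2 : 2^(m+1) = 2*2^m := by ring
    have hb2 : b / 2 < 2^m := by omega
    have hsplit : b = 2*(b/2) + b % 2 := by omega
    have hpop : popc b = popc (b/2) + b % 2 := by
      conv_lhs => rw [hsplit]; rw [popc_two_mul_add _ _ (by omega)]
    obtain ⟨h1, hEq⟩ := ih (b/2) hb2
    constructor
    · omega
    · intro h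
      have hm : popc (b/2) = m := by omega
      have := hEq hm
      have h1m : 1 ≤ 2^m := Nat.one_le_two_pow
      omega

-- odd numbers keep their higher bits when decremented
lemma odd_testBit_pred (W i : Nat) (hi : 1 ≤ i) : (2*W+1).testBit i = (2*W).testBit i := by
  obtain ⟨i, rfl⟩ := Nat.exists_eq_add_of_le hi
  rw [Nat.add_comm 1 i, Nat.testBit_add_one, Nat.testBit_add_one]
  congr 1
  omega

-- s & -s under PySem's two's-complement band, reduced to Nat
lemma band_neg_eq (u : Nat) (hu : 0 < u) :
    PySem.Int.band (u : Int) (-(u : Int)) = ((u - (u &&& (u-1)) : Nat) : Int) := by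
  have h1 : ¬ (0 ≤ -(u:Int)) := by omega
  simp only [PySem.Int.band, h1, if_false, if_pos (by positivity : (0:Int) ≤ (u:Int))]
  congr 1
  have h2 : (-(-(u:Int)) - 1).toNat = u - 1 := by omega
  have h3 : ((u:Int)).toNat = u := by omega
  rw [h2, h3]

lemma land_pred (a m e : Nat) (hm : 1 ≤ m) :
    (((2*a+1) * 2^m - 1) * 2^e) &&& ((((2*a+1) * 2^m - 1) * 2^e) - 1)
      = (((2*a+1) * 2^m - 1) - 1) * 2^e := by
  set V := (2*a+1) * 2^m - 1 with hVdef
  have hsplit : (2*a+1) * 2^m = 2*((2*a+1)*2^(m-1)) := by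
    conv_lhs => rw [show m = (m-1)+1 by omega]
    ring
  have hX : 1 ≤ (2*a+1)*2^(m-1) := Nat.one_le_iff_ne_zero.mpr (by positivity)
  have hW : V = 2*((2*a+1)*2^(m-1) - 1) + 1 := by omega
  set W := (2*a+1)*2^(m-1) - 1
  have hV1 : 1 ≤ V := by omega
  have hpe : 1 ≤ 2^e := Nat.one_le_two_pow
  have hpred : V * 2^e - 1 = 2^e * (V-1) + (2^e - 1) := by
    have hmul : V * 2^e = (V-1)*2^e + 2^e := by
      calc V * 2^e = ((V-1)+1) * 2^e := by rw [Nat.sub_add_cancel hV1]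
      _ = (V-1)*2^e + 2^e := by ring
    rw [Nat.mul_comm (2^e)]
    omega
  apply Nat.eq_of_testBit_eq
  intro i
  rw [Nat.testBit_and, Nat.testBit_mul_two_pow, Nat.testBit_mul_two_pow, hpred,
      Nat.testBit_two_pow_mul_add _ (by omega)]
  by_cases hie : i < e
  · have hn : ¬ e ≤ i := by omega
    simp [hn]
  · have he : e ≤ i := by omega
    simp only [if_neg hie, he, decide_true, Bool.true_and]
    rcases Nat.eq_zero_or_pos (i - e) with hj | hj
    · rw [hj, hW]
      simp [Nat.testBit_zero]
    · rw [hW, odd_testBit_pred _ _ hj, show 2*W+1-1 = 2*W by omega, Bool.and_self]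

lemma c_val (a m e : Nat) (hm : 1 ≤ m) :
    PySem.Int.band ((((2*a+1) * 2^m - 1) * 2^e : Nat) : Int) (-((((2*a+1) * 2^m - 1) * 2^e : Nat) : Int))
      = ((2^e : Nat) : Int) := by
  have hV1 : 1 ≤ (2*a+1) * 2^m - 1 := by
    have h2 : (2:Nat) ≤ 2^m := by
      calc (2:Nat) = 2^1 := rfl
      _ ≤ 2^m := Nat.pow_le_pow_right (by norm_num) hm
    have h3 : 2^m ≤ (2*a+1) * 2^m := Nat.le_mul_of_pos_left _ (by omega)
    omega
  have hu : 0 < ((2*a+1) * 2^m - 1) * 2^e := Nat.mul_pos (by omega) (by positivity)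
  rw [band_neg_eq _ hu, land_pred a m e hm]
  congr 1
  generalize hGV : (2*a+1) * 2^m - 1 = V at hV1 ⊢
  generalize hGE : (2:Nat)^e = E
  have hmul : V * E = (V-1)*E + E := by
    calc V * E = ((V-1)+1) * E := by rw [Nat.sub_add_cancel hV1]
    _ = (V-1)*E + E := by ring
  omega

lemma xor_val (a m e : Nat) (hm : 1 ≤ m) :
    ((2*a+1) * 2^(e+m)) ^^^ (((2*a+1) * 2^m - 1) * 2^e) = (2^(m+1) - 1) * 2^e := by
  have hVform : (2*a+1) * 2^m - 1 = 2^m * (2*a) + (2^m - 1) := by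
    have h : (2*a+1) * 2^m = 2^m * (2*a) + 2^m := by ring
    have h1 : 1 ≤ (2:Nat)^m := Nat.one_le_two_pow
    omega
  have hVbit : ∀ i, ((2*a+1) * 2^m - 1).testBit i
      = if i < m then true else (2*a).testBit (i - m) := by
    intro i
    rw [hVform, Nat.testBit_two_pow_mul_add _ (Nat.sub_lt (by positivity) one_pos)]
    by_cases him : i < m
    · simp [him, Nat.testBit_two_pow_sub_one]
    · simp [him]
  apply Nat.eq_of_testBit_eq
  intro j
  rw [Nat.testBit_xor, Nat.testBit_mul_two_pow, Nat.testBit_mul_two_pow,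
      Nat.testBit_mul_two_pow, hVbit, Nat.testBit_two_pow_sub_one]
  by_cases h1 : j < e
  · have : ¬ e ≤ j := by omega
    have : ¬ e + m ≤ j := by omega
    simp [*]
  · have he : e ≤ j := by omega
    by_cases h2 : j < e + m
    · have hem : ¬ e + m ≤ j := by omega
      have hjm : j - e < m := by omega
      have hjm1 : j - e < m + 1 := by omega
      simp [he, hem, hjm, hjm1]
    · have hem : e + m ≤ j := by omega
      by_cases h3 : j = e + m
      · have hje : j - e = m := by omega
        have hm1 : ¬ j - e < m := by omega
        subst h3
        simp [he, hje, Nat.testBit_zero, Nat.mul_mod_right]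
      · have hj1 : 1 ≤ j - (e + m) := by omega
        have hnm : ¬ j - e < m := by omega
        have hnm1 : ¬ j - e < m + 1 := by omega
        have harith : j - e - m = j - (e + m) := by omega
        simp [he, hem, hnm, hnm1, harith, odd_testBit_pred _ _ hj1]

lemma q_val (m e : Nat) (hm : 1 ≤ m) :
    ((2^(m+1) - 1) * 2^e) >>> 2 / 2^e = 2^(m-1) - 1 := by
  rw [Nat.shiftRight_eq_div_pow, Nat.div_div_eq_div_mul,
      Nat.mul_div_mul_right _ _ (by positivity : 0 < (2:Nat)^e)]
  have h : 2^(m+1) = 4*(2^(m-1)) := by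
    rw [show m+1 = (m-1)+2 by omega]; ring
  have h1 : 1 ≤ (2:Nat)^(m-1) := Nat.one_le_two_pow
  have hnum : 2^(m+1) - 1 = 4*(2^(m-1) - 1) + 3 := by omega
  rw [hnum, show (2:Nat)^2 = 4 from rfl, Nat.mul_add_div (by norm_num)]
  norm_num

lemma or_val (a m e : Nat) (hm : 1 ≤ m) :
    (2^(m-1) - 1) ||| ((2*a+1) * 2^(e+m)) = (2*a+1) * 2^(e+m) + (2^(m-1) - 1) := by
  have hle : (2:Nat)^(m-1) ≤ 2^(e+m) := Nat.pow_le_pow_right (by norm_num) (by omega)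
  have hQ : 2^(m-1) - 1 < 2^(e+m) := by
    have := Nat.one_le_two_pow (n := m-1)
    omega
  apply Nat.eq_of_testBit_eq
  intro j
  rw [Nat.testBit_or, Nat.testBit_mul_two_pow,
      show (2*a+1) * 2^(e+m) + (2^(m-1) - 1) = 2^(e+m)*(2*a+1) + (2^(m-1) - 1) by ring,
      Nat.testBit_two_pow_mul_add _ hQ]
  by_cases h : j < e + m
  · have : ¬ e + m ≤ j := by omega
    simp [h, this]
  · have hle2 : (2:Nat)^(e+m) ≤ 2^j := Nat.pow_le_pow_right (by norm_num) (by omega)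
    have hbit : (2^(m-1) - 1).testBit j = false := Nat.testBit_lt_two_pow (by omega)
    have hj : e + m ≤ j := by omega
    simp [h, hbit, hj]

lemma stepEq (a m e : Nat) (hm : 1 ≤ m) :
    gosperNext ((((2*a+1) * 2^m - 1) * 2^e : Nat) : Int)
      = (((2*a+1) * 2^(e+m) + (2^(m-1) - 1) : Nat) : Int) := by
  have hV1 : 1 ≤ (2*a+1) * 2^m := Nat.one_le_iff_ne_zero.mpr (by positivity)
  have hR : ((2*a+1) * 2^m - 1) * 2^e + 2^e = (2*a+1) * 2^(e+m) := by
    calc ((2*a+1) * 2^m - 1) * 2^e + 2^e = (((2*a+1) * 2^m - 1) + 1) * 2^e := by ring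
    _ = ((2*a+1) * 2^m) * 2^e := by rw [Nat.sub_add_cancel hV1]
    _ = (2*a+1) * 2^(e+m) := by rw [pow_add]; ring
  simp only [gosperNext]
  rw [c_val a m e hm]
  rw [show (((((2*a+1) * 2^m - 1) * 2^e : Nat) : Int) + ((2^e : Nat) : Int))
        = ((((2*a+1) * 2^m - 1) * 2^e + 2^e : Nat) : Int) by push_cast; ring, hR]
  rw [PySem.Int.bxor_natCast, xor_val a m e hm, ← Int.natCast_shiftRight,
      PySem.Int.floordiv_natCast, q_val m e hm, PySem.Int.bor_natCast, or_val a m e hm]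

lemma popc_u (a m e : Nat) (_hm : 1 ≤ m) : popc (((2*a+1) * 2^m - 1) * 2^e) = popc a + m := by
  have h0 : (0:Nat) < 2^e := by positivity
  have h1 : popc (((2*a+1) * 2^m - 1) * 2^e) = popc ((2*a+1) * 2^m - 1) := by
    have := popc_mulAdd e ((2*a+1) * 2^m - 1) 0 h0
    simpa [popc] using this
  have hVform : (2*a+1) * 2^m - 1 = (2*a) * 2^m + (2^m - 1) := by
    have h : (2*a+1) * 2^m = (2*a) * 2^m + 2^m := by ring
    have h1 : 1 ≤ (2:Nat)^m := Nat.one_le_two_pow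
    omega
  rw [h1, hVform, popc_mulAdd m _ _ (Nat.sub_lt (by positivity) one_pos),
      popc_two_pow_sub_one, show 2*a = 2*a + 0 by omega, popc_two_mul_add a 0 (by omega)]
  omega

lemma popc_nu (a m e : Nat) (hm : 1 ≤ m) :
    popc ((2*a+1) * 2^(e+m) + (2^(m-1) - 1)) = popc a + m := by
  have hle : (2:Nat)^(m-1) ≤ 2^(e+m) := Nat.pow_le_pow_right (by norm_num) (by omega)
  have h1 : 1 ≤ (2:Nat)^(m-1) := Nat.one_le_two_pow
  rw [popc_mulAdd (e+m) _ _ (by omega), popc_two_pow_sub_one,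
      popc_two_mul_add a 1 (by omega)]
  omega

lemma mid_lemma (a m e : Nat) (hm : 1 ≤ m) (t : Nat)
    (h1 : ((2*a+1) * 2^m - 1) * 2^e < t) (h2 : t < (2*a+1) * 2^(e+m) + (2^(m-1) - 1)) :
    popc t ≠ popc a + m := by
  have hpe : 1 ≤ (2:Nat)^e := Nat.one_le_two_pow
  have hpm1 : 1 ≤ (2:Nat)^(m-1) := Nat.one_le_two_pow
  have hV1 : 1 ≤ (2*a+1) * 2^m := Nat.one_le_iff_ne_zero.mpr (by positivity)
  have hu_eq : ((2*a+1) * 2^m - 1) * 2^e + 2^e = (2*a+1) * 2^(e+m) := by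
    calc ((2*a+1) * 2^m - 1) * 2^e + 2^e = (((2*a+1) * 2^m - 1) + 1) * 2^e := by ring
    _ = ((2*a+1) * 2^m) * 2^e := by rw [Nat.sub_add_cancel hV1]
    _ = (2*a+1) * 2^(e+m) := by rw [pow_add]; ring
  have hA1 : (2*a+1) * 2^(e+m) = (2*a) * 2^(e+m) + 2^(e+m) := by ring
  have hHsplit : (2^m - 1) * 2^e + 2^e = 2^(e+m) := by
    have hP : 1 ≤ (2:Nat)^m := Nat.one_le_two_pow
    calc (2^m - 1) * 2^e + 2^e = ((2^m - 1) + 1) * 2^e := by ring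
    _ = 2^m * 2^e := by rw [Nat.sub_add_cancel hP]
    _ = 2^(e+m) := by rw [pow_add]; ring
  by_cases hcase : t < (2*a+1) * 2^(e+m)
  · set w := t - (2*a) * 2^(e+m) with hw
    have hwub : w < 2^(e+m) := by omega
    have hwlb : 2^(e+m) - 2^e < w := by omega
    have ht : t = (2*a) * 2^(e+m) + w := by omega
    set low := w - (2^m - 1) * 2^e with hlow
    have hlow1 : 1 ≤ low := by omega
    have hlow2 : low < 2^e := by omega
    have hwform : w = (2^m - 1) * 2^e + low := by omega
    rw [ht, popc_mulAdd (e+m) _ _ hwub, hwform, popc_mulAdd e _ _ hlow2,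
        popc_two_pow_sub_one, show 2*a = 2*a + 0 by omega, popc_two_mul_add a 0 (by omega)]
    have : popc low ≠ 0 := by
      intro h
      exact absurd ((popc_eq_zero low).mp h) (by omega)
    omega
  · have hle : (2:Nat)^(m-1) ≤ 2^(e+m) := Nat.pow_le_pow_right (by norm_num) (by omega)
    set w := t - (2*a+1) * 2^(e+m) with hw
    have hwub : w < 2^(m-1) - 1 := by omega
    have ht : t = (2*a+1) * 2^(e+m) + w := by omega
    rw [ht, popc_mulAdd (e+m) _ _ (by omega), popc_two_mul_add a 1 (by omega)]
    intro hcontra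
    have hpw : popc w = m - 1 := by omega
    have := (popc_bound (m-1) w (by omega)).2 hpw
    omega

lemma decomp (u : Nat) (hu : 0 < u) :
    ∃ a m e : Nat, 1 ≤ m ∧ u = ((2*a+1) * 2^m - 1) * 2^e := by
  obtain ⟨e, v, hvodd, huv⟩ := Nat.exists_eq_two_pow_mul_odd (show u ≠ 0 by omega)
  obtain ⟨m, w, hwodd, hvw⟩ := Nat.exists_eq_two_pow_mul_odd (show v+1 ≠ 0 by omega)
  obtain ⟨c, hc⟩ := hvodd
  obtain ⟨d, hd⟩ := hwodd
  have hm1 : 1 ≤ m := by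
    rcases Nat.eq_zero_or_pos m with h | h
    · subst h; simp at hvw; omega
    · exact h
  refine ⟨d, m, e, hm1, ?_⟩
  have hv : v = (2*d+1) * 2^m - 1 := by
    have : v + 1 = (2*d+1) * 2^m := by rw [hvw, hd]; ring
    omega
  rw [huv, hv]; ring

-- summary: the Gosper step sends s to the NEXT number with the same popcount
lemma step_summary (s : Nat) (hs : 0 < s) :
    ∃ ns : Nat, gosperNext (s : Int) = (ns : Int) ∧ s < ns ∧ popc ns = popc s ∧
      ∀ t, s < t → t < ns → popc t ≠ popc s := by
  obtain ⟨a, m, e, hm, rfl⟩ := decomp s hs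
  refine ⟨(2*a+1) * 2^(e+m) + (2^(m-1) - 1), stepEq a m e hm, ?_, ?_, ?_⟩
  · have hpe : 1 ≤ (2:Nat)^e := Nat.one_le_two_pow
    have hpm1 : 1 ≤ (2:Nat)^(m-1) := Nat.one_le_two_pow
    have hV1 : 1 ≤ (2*a+1) * 2^m := Nat.one_le_iff_ne_zero.mpr (by positivity)
    have hu_eq : ((2*a+1) * 2^m - 1) * 2^e + 2^e = (2*a+1) * 2^(e+m) := by
      calc ((2*a+1) * 2^m - 1) * 2^e + 2^e = (((2*a+1) * 2^m - 1) + 1) * 2^e := by ring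
      _ = ((2*a+1) * 2^m) * 2^e := by rw [Nat.sub_add_cancel hV1]
      _ = (2*a+1) * 2^(e+m) := by rw [pow_add]; ring
    omega
  · rw [popc_nu a m e hm, popc_u a m e hm]
  · intro t ht1 ht2
    rw [popc_u a m e hm]
    exact mid_lemma a m e hm t ht1 ht2

lemma gosperLoop_eq (fuel : Nat) : ∀ (s L K : Nat), 0 < s → popc s = K → L ≤ s + fuel →
    gosperLoop fuel (s : Int) (L : Int)
      = ((List.range' s (L - s)).filter (fun x => popc x == K)).map (fun x : Nat => (x : Int)) := by
  induction fuel with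
  | zero =>
    intro s L K hs hp hL
    have h0 : L - s = 0 := by omega
    simp [gosperLoop, h0]
  | succ fuel ih =>
    intro s L K hs hp hL
    by_cases hsL : s < L
    · have hcast : (s:Int) < (L:Int) := by exact_mod_cast hsL
      obtain ⟨ns, hnext, hlt, hpop, hmid⟩ := step_summary s hs
      rw [gosperLoop, if_pos hcast, hnext,
          ih ns L K (by omega) (by rw [hpop, hp]) (by omega)]
      by_cases hnsL : ns ≤ L
      · have hsplit : L - s = ((ns - s - 1) + (L - ns)) + 1 := by omega
        rw [hsplit, List.range'_succ, ← List.range'_append,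
            show s + 1 + 1 * (ns - s - 1) = ns by omega]
        rw [List.filter_cons_of_pos (by simp [hp]), List.filter_append]
        have hnil : (List.range' (s+1) (ns - s - 1)).filter (fun x => popc x == K) = [] := by
          rw [List.filter_eq_nil_iff]
          intro t htmem
          rw [List.mem_range'_1] at htmem
          have := hmid t (by omega) (by omega)
          simp [hp] at this ⊢
          omega
        rw [hnil, List.nil_append, List.map_cons]
      · have hz : L - ns = 0 := by omega
        have hsplit : L - s = (L - s - 1) + 1 := by omega
        rw [hz, hsplit, List.range'_succ,
            List.filter_cons_of_pos (by simp [hp])]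
        have hnil : (List.range' (s+1) (L - s - 1)).filter (fun x => popc x == K) = [] := by
          rw [List.filter_eq_nil_iff]
          intro t htmem
          rw [List.mem_range'_1] at htmem
          have := hmid t (by omega) (by omega)
          simp [hp] at this ⊢
          omega
        rw [hnil]
        simp
    · have hcast : ¬ (s:Int) < (L:Int) := by exact_mod_cast hsL
      have h0 : L - s = 0 := by omega
      rw [gosperLoop, if_neg hcast, h0]
      simp

lemma shift_one (K : Nat) : (1 : Int) <<< K = ((2^K : Nat) : Int) := by
  have h : (1 : Nat) <<< K = 2^K := by rw [Nat.shiftLeft_eq, one_mul]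
  rw [← h, Int.natCast_shiftLeft, Nat.cast_one]

-- ===== the common specification: the ascending list of k-popcount numbers below 2^n =====
def ffil (N K : Nat) : List Nat := (List.range (2^N)).filter (fun x => popc x == K)

lemma ffil_zero (N : Nat) : ffil N 0 = [0] := by
  unfold ffil
  rw [List.range_eq_range',
      show (2:Nat)^N = (2^N - 1) + 1 by have := Nat.one_le_two_pow (n := N); omega,
      List.range'_succ, List.filter_cons_of_pos (by simp [popc])]
  have h2 : (List.range' (0 + 1) (2^N - 1)).filter (fun x => popc x == 0) = [] := by
    rw [List.filter_eq_nil_iff]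
    intro t ht
    rw [List.mem_range'_1] at ht
    simp only [beq_iff_eq]
    intro hc
    have := (popc_eq_zero t).mp hc
    omega
  rw [h2]

lemma ffil_big (N K : Nat) (h : N < K) : ffil N K = [] := by
  unfold ffil
  rw [List.filter_eq_nil_iff]
  intro t ht
  rw [List.mem_range] at ht
  simp only [beq_iff_eq]
  intro hc
  have := (popc_bound N t ht).1
  omega

lemma popc_one : popc 1 = 1 := by simp [popc]

lemma ffil_succ_width (N K : Nat) (hK : 1 ≤ K) :
    ffil (N+1) K = ffil N K ++ (ffil N (K-1)).map (fun y => 2^N + y) := by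
  unfold ffil
  rw [show (2:Nat)^(N+1) = 2^N + 2^N by ring, List.range_add, List.filter_append, List.filter_map]
  congr 1
  congr 1
  apply List.filter_congr
  intro y hy
  rw [List.mem_range] at hy
  have h1 : popc (2^N + y) = 1 + popc y := by
    have h := popc_mulAdd N 1 y hy
    rw [one_mul] at h
    rw [h, popc_one]
  rw [Function.comp_apply, h1, Bool.eq_iff_iff]
  simp only [beq_iff_eq]
  omega

lemma ffil_rec (K : Nat) : ∀ N : Nat,
    ffil N (K+1) = (List.range' K (N - K)).flatMap (fun h => (ffil h K).map (fun y => 2^h + y)) := by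
  intro N
  induction N with
  | zero =>
    rw [ffil_big 0 (K+1) (by omega), show 0 - K = 0 by omega]
    simp
  | succ N ih =>
    by_cases hNK : K ≤ N
    · rw [ffil_succ_width N (K+1) (by omega), ih, show (K+1) - 1 = K by omega,
          show N + 1 - K = (N - K) + 1 by omega, List.range'_1_concat,
          List.flatMap_append, show K + (N - K) = N by omega]
      simp [List.flatMap]
    · rw [ffil_big (N+1) (K+1) (by omega), show N + 1 - K = 0 by omega]
      simp

lemma or_pow (y h : Nat) (hy : y < 2^h) : y ||| 2^h = 2^h + y := by
  apply Nat.eq_of_testBit_eq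
  intro j
  rw [Nat.testBit_or, show 2^h + y = 2^h * 1 + y by ring,
      Nat.testBit_two_pow_mul_add _ hy, Nat.testBit_two_pow]
  by_cases h1 : j < h
  · have : ¬ h = j := by omega
    simp [h1, this]
  · by_cases h2 : j = h
    · subst h2
      have : y.testBit j = false := Nat.testBit_lt_two_pow hy
      simp [this]
    · have hgt : 1 ≤ j - h := by omega
      have hy2 : y.testBit j = false := by
        apply Nat.testBit_lt_two_pow
        calc y < 2^h := hy
        _ ≤ 2^j := Nat.pow_le_pow_right (by norm_num) (by omega)
      have h3 : Nat.testBit 1 (j - h) = false := by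
        apply Nat.testBit_lt_two_pow
        calc (1:Nat) < 2^1 := by norm_num
        _ ≤ 2^(j-h) := Nat.pow_le_pow_right (by norm_num) hgt
      have : ¬ h = j := by omega
      simp [h1, hy2, h3, this]

lemma alt_eq (K : Nat) : ∀ N : Nat,
    gosper_masks_alt ((N : Nat) : Int) ((K : Nat) : Int)
      = (ffil N K).map (fun x : Nat => (x : Int)) := by
  induction K with
  | zero =>
    intro N
    rw [gosper_masks_alt, if_neg (not_not_intro ⟨le_refl 0, Int.natCast_nonneg N⟩),
        if_pos (by norm_num), ffil_zero]
    simp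
  | succ K ih =>
    intro N
    by_cases hKN : K + 1 ≤ N
    · have hg : (0 : Int) ≤ ((K+1 : Nat) : Int) ∧ ((K+1 : Nat) : Int) ≤ ((N : Nat) : Int) := by
        constructor
        · exact Int.natCast_nonneg _
        · exact_mod_cast hKN
      have hne : ((K+1 : Nat) : Int) ≠ 0 := by exact_mod_cast Nat.succ_ne_zero K
      rw [gosper_masks_alt, if_neg (not_not_intro hg), if_neg hne,
          show ((K+1 : Nat) : Int) - 1 = ((K : Nat) : Int) by push_cast; ring,
          PySem.List.pyRange_one,
          show ((((N : Nat) : Int)) - ((K : Nat) : Int)).toNat = N - K by omega,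
          ffil_rec K N, List.range'_eq_map_range]
    -- both sides are flatMaps over (List.range (N-K)); compare itemwise
      rw [List.flatMap_def, List.flatMap_def, List.map_flatten]
      congr 1
      simp only [List.map_map]
      apply List.map_congr_left
      intro j hj
      rw [List.mem_range] at hj
      simp only [Function.comp_apply]
      have hH : ((K : Nat) : Int) + (j : Int) = ((K + j : Nat) : Int) := by push_cast; ring
      rw [hH, Int.toNat_natCast, ih (K + j), List.map_map, List.map_map]
      apply List.map_congr_left
      intro y hy
      have hylt : y < 2^(K+j) := by
        have := List.mem_filter.mp hy
        exact List.mem_range.mp this.1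
      rw [Function.comp_apply, Function.comp_apply, shift_one (K+j),
          PySem.Int.bor_natCast, or_pow y (K+j) hylt]
    · have hgf : ¬ (0 ≤ ((K+1 : Nat) : Int) ∧ ((K+1 : Nat) : Int) ≤ ((N : Nat) : Int)) := by
        intro hc
        have : (K+1 : Nat) ≤ N := by exact_mod_cast hc.2
        omega
      rw [gosper_masks_alt, if_pos hgf, ffil_big N (K+1) (by omega)]
      simp

lemma A_eq (N K : Nat) (hK : 1 ≤ K) (hKN : K ≤ N) :
    gosperLoop (2^N) (((2^K - 1 : Nat) : Nat) : Int) (((2^N : Nat) : Nat) : Int)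
      = (ffil N K).map (fun x : Nat => (x : Int)) := by
  have h2K : (2:Nat) ≤ 2^K := by
    calc (2:Nat) = 2^1 := rfl
    _ ≤ 2^K := Nat.pow_le_pow_right (by norm_num) hK
  have h2KN : (2:Nat)^K ≤ 2^N := Nat.pow_le_pow_right (by norm_num) hKN
  rw [gosperLoop_eq (2^N) (2^K - 1) (2^N) K (by omega)
        (by rw [popc_two_pow_sub_one]) (by omega)]
  unfold ffil
  congr 1
  have hnil : (List.range' 0 (2^K - 1)).filter (fun x => popc x == K) = [] := by
    rw [List.filter_eq_nil_iff]
    intro t ht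
    rw [List.mem_range'_1] at ht
    simp only [beq_iff_eq]
    intro hc
    have hb := (popc_bound K t (by omega)).2 hc
    omega
  conv_rhs => rw [List.range_eq_range',
    show (2:Nat)^N = (2^K - 1) + (2^N - (2^K - 1)) by omega, ← List.range'_append]
  rw [List.filter_append, hnil, List.nil_append, show 0 + 1 * (2^K - 1) = 2^K - 1 by omega]

-- ===== VERDICT (by name: the statement is the Claim_ definition above) =====
theorem gosper_masks_spec : Claim_equal_gosper_masks := by
  intro n k _
  unfold Spec_gosper_masks
  by_cases h1 : 0 ≤ k ∧ k ≤ n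
  · obtain ⟨hk0, hkn⟩ := h1
    by_cases h2 : k = 0
    · subst h2
      rw [gosper_masks, gosper_masks_alt, if_neg (not_not_intro ⟨hk0, hkn⟩),
          if_neg (not_not_intro ⟨hk0, hkn⟩), if_pos rfl, if_pos rfl]
    · have hn0 : 0 ≤ n := le_trans hk0 hkn
      set N := n.toNat with hN
      set K := k.toNat with hK
      have hnN : n = (N : Int) := by omega
      have hkK : k = (K : Int) := by omega
      have hK1 : 1 ≤ K := by omega
      have hKN : K ≤ N := by omega
      clear_value N K
      rw [hnN, hkK, alt_eq K N, gosper_masks,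
          if_neg (not_not_intro ⟨by omega, by exact_mod_cast hKN⟩),
          if_neg (by exact_mod_cast Nat.one_le_iff_ne_zero.mp hK1)]
      show gosperLoop (((1:Int) <<< ((N:Int)).toNat)).toNat
            ((1:Int) <<< ((K:Int)).toNat - 1) ((1:Int) <<< ((N:Int)).toNat)
          = (ffil N K).map (fun x : Nat => (x : Int))
      rw [Int.toNat_natCast, Int.toNat_natCast, shift_one K, shift_one N,
          show ((2^K : Nat) : Int) - 1 = ((2^K - 1 : Nat) : Int) by
            have : 1 ≤ (2:Nat)^K := Nat.one_le_two_pow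
            omega,
          Int.toNat_natCast]
      exact A_eq N K hK1 hKN
  · rw [gosper_masks, gosper_masks_alt, if_pos h1, if_pos h1]
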